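-- pv_equiv track=rewrite | github.com/Vulcan19rl/GameHubGameAdder | game_adder.py | is_valid_exe
-- ===== SOURCE A (Python) =====
-- def is_valid_exe(game_name, exe_name):
--         matching_first = game_name[0].lower() == exe_name[0].lower()
--         matching_chars = 0
--         if(matching_first):
--             for char in game_name:
--                 if(char in exe_name):
--                     game_name = game_name.replace(char, "", 1)
--                     matching_chars += 1
--         return matching_first and matching_chars >= 3 and len(exe_name) <= len(game_name)
-- ===== SOURCE B (Python) =====
-- def is_valid_exe(game_name, exe_name):
--     matching_first = game_name[0].lower() == exe_name[0].lower()
--     if not matching_first: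
--         return False
--     matching_chars = sum(1 for c in game_name if c in exe_name)
--     return matching_chars >= 3 and len(exe_name) <= len(game_name) - matching_chars
-- ===== Notes on version B (the rewrite author's own statement) =====
-- stated objective: faster
-- what changed: B drops A's repeated replace-based mutation of game_name: it counts (with multiplicity) the characters of game_name that occur in exe_name in one comprehension and compares lengths arithmetically (len(game_name) - matching_chars) instead of measuring the mutated string.
import Mathlib
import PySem

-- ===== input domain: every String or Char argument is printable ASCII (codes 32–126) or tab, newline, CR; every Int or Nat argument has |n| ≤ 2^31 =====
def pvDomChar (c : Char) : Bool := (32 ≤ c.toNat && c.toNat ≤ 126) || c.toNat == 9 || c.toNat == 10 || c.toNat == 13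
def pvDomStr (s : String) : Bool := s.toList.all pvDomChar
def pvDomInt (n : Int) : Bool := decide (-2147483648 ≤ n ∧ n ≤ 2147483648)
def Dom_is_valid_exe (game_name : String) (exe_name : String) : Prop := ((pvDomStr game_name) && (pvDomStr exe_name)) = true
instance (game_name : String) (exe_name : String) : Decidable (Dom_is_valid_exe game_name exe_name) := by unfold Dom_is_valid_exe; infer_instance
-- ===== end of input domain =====

-- B replaces A's repeated replace-mutation of game_name by a single membership count
-- and an arithmetic length comparison (measured faster: no quadratic string rebuilding).
-- A only rebinds its local game_name, which is not caller-observable.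

-- ===== PORT A =====
-- the loop: iterates over the ORIGINAL game_name chars (Python's `for` iterates the
-- object bound at loop entry); state = (current game_name, matching_chars).
-- `char in exe_name` for a 1-char string is exactly char membership;
-- `game_name.replace(char, "", 1)` removes the first occurrence = List.erase.
def pvALoop (el : List Char) : List Char → List Char → Nat → (List Char × Nat)
  | [], g, mc => (g, mc)
  | c :: rest, g, mc =>
    if el.contains c then pvALoop el rest (g.erase c) (mc + 1)
    else pvALoop el rest g mc

-- `.lower()` on a 1-char ASCII string = Char.toLower (exact on Dom's ASCII chars)
def is_valid_exe (game_name : String) (exe_name : String) : Bool :=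
  let gl := game_name.toList
  let el := exe_name.toList
  -- game_name[0] / exe_name[0]: IndexError on empty, excluded by Pre_; headD is a dummy there
  let matching_first := (gl.headD ' ').toLower == (el.headD ' ').toLower
  let st := if matching_first then pvALoop el gl gl 0 else (gl, 0)
  matching_first && decide (3 ≤ st.2) && decide (el.length ≤ st.1.length)

-- ===== PORT B =====
def is_valid_exe_alt (game_name : String) (exe_name : String) : Bool :=
  let gl := game_name.toList
  let el := exe_name.toList
  let matching_first := (gl.headD ' ').toLower == (el.headD ' ').toLower
  if !matching_first then false
  else
    -- sum(1 for c in game_name if c in exe_name) = countP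
    let matching_chars := gl.countP (fun c => el.contains c)
    decide (3 ≤ matching_chars) && decide (el.length ≤ gl.length - matching_chars)

-- ===== PRECONDITION & SPEC =====
-- Pre_ excludes exactly the inputs where Python A raises IndexError: an empty string
-- on either side (game_name[0] / exe_name[0]); B raises there too.
def Pre_is_valid_exe (game_name : String) (exe_name : String) : Prop :=
  game_name ≠ "" ∧ exe_name ≠ ""
instance (game_name : String) (exe_name : String) : Decidable (Pre_is_valid_exe game_name exe_name) := by unfold Pre_is_valid_exe; infer_instance

def pvWitness_is_valid_exe : String × String := ("Doom", "doom.exe")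

def Spec_is_valid_exe (game_name : String) (exe_name : String) (out : Bool) : Prop := out = is_valid_exe_alt game_name exe_name
instance (game_name : String) (exe_name : String) (out : Bool) : Decidable (Spec_is_valid_exe game_name exe_name out) := by unfold Spec_is_valid_exe; infer_instance

-- ===== CLAIM =====
def Claim_equal_is_valid_exe : Prop := ∀ (game_name : String) (exe_name : String), Dom_is_valid_exe game_name exe_name → Pre_is_valid_exe game_name exe_name → Spec_is_valid_exe game_name exe_name (is_valid_exe game_name exe_name)

-- ===== LEMMAS AND PROOFS =====

-- loop invariant: as long as the remaining chars are a sub-multiset of the current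
-- string, the loop's counter counts the matching chars and the final length is the
-- original length minus that count.
theorem pvALoop_spec (el : List Char) :
    ∀ (cs g : List Char) (mc : Nat), List.Subperm cs g →
      (pvALoop el cs g mc).2 = mc + cs.countP (fun c => el.contains c) ∧
      (pvALoop el cs g mc).1.length = g.length - cs.countP (fun c => el.contains c) := by
  intro cs
  induction cs with
  | nil => intro g mc _; simp [pvALoop]
  | cons c rest ih =>
    intro g mc h
    simp only [List.contains_eq_mem] at ih ⊢
    have hrest : List.Subperm rest (g.erase c) := by
      have := h.erase c
      simpa [List.erase_cons_head] using this
    have hcg : c ∈ g := h.subset (List.mem_cons_self ..)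
    by_cases hc : c ∈ el
    · have hth := ih (g.erase c) (mc + 1) hrest
      have hg : (g.erase c).length = g.length - 1 := List.length_erase_of_mem hcg
      refine ⟨?_, ?_⟩ <;>
        simp [pvALoop, List.contains_eq_mem, hc, hth.1, hth.2, hg] <;>
        omega
    · have hth := ih g mc (((List.sublist_cons_self c rest).subperm).trans h)
      refine ⟨?_, ?_⟩ <;>
        simp [pvALoop, List.contains_eq_mem, hc, hth.1, hth.2]

-- ===== VERDICT =====
theorem is_valid_exe_spec : Claim_equal_is_valid_exe := by
  intro game_name exe_name _ _
  unfold Spec_is_valid_exe is_valid_exe is_valid_exe_alt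
  have h := pvALoop_spec exe_name.toList game_name.toList game_name.toList 0
    (List.Subperm.refl _)
  by_cases hmf : (game_name.toList.head?.getD ' ').toLower
      = (exe_name.toList.head?.getD ' ').toLower
  · simp [hmf, h.1, h.2, List.contains_eq_mem]
  · simp [hmf]
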